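-- pv_equiv track=rewrite | github.com/DanPriam/MyProgs | brakhage_parallel.py | auxiliary_arrays
-- ===== SOURCE A (Python) =====
-- def auxiliary_arrays(M, num):
--     ave, res = divmod(M, num)
--     rcounts = [0] * num
--     displs = [0] * num
--     for k in range(0, num):
--         if k < res:
--             rcounts[k] = ave + 1
--         else:
--             rcounts[k] = ave
--         if k == 0:
--             displs[k] = 0
--         else:
--             displs[k] = displs[k-1] + rcounts[k-1]
--     return rcounts, displs
-- ===== SOURCE B (Python) =====
-- def auxiliary_arrays(M, num):
--     ave, res = divmod(M, num)
--     rcounts = [ave + 1 if k < res else ave for k in range(num)]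
--     displs = [ave * k + min(k, res) for k in range(num)]
--     return rcounts, displs
-- ===== Notes on version B (the rewrite author's own statement) =====
-- stated objective: simpler
-- what changed: Replaces the index loop that writes into preallocated arrays with a running prefix-sum by two independent comprehensions, computing each displacement with the closed form ave*k + min(k, res).
import Mathlib
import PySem

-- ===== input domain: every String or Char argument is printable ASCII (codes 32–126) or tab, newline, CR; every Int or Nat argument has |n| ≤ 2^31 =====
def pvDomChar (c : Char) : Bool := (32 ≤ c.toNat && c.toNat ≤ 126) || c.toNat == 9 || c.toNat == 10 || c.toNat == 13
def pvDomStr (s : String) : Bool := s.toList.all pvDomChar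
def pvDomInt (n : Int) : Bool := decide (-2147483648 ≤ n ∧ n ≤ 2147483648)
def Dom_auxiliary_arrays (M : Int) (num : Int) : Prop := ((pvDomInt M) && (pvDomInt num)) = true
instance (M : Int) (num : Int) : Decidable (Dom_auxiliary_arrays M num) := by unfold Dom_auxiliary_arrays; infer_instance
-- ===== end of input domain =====

-- B replaces A's index loop with its carried prefix-sum by two independent comprehensions
-- using the closed form displs[k] = ave*k + min(k, res); objective: simpler.

-- ===== PORT A =====
-- one iteration of A's loop body: writes rcounts[k], then displs[k] (reading displs[k-1] and
-- the just-updated rcounts at k-1). The pyGetD defaults are never reached: 0 ≤ k-1 < len there.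
def pvAStep (ave res : Int) (st : List Int × List Int) (k : Int) : List Int × List Int :=
  let rcounts := PySem.List.pySetD st.1 k (if k < res then ave + 1 else ave)
  let displs :=
    if k = 0 then PySem.List.pySetD st.2 k 0
    else PySem.List.pySetD st.2 k
      (PySem.List.pyGetD st.2 (k - 1) 0 + PySem.List.pyGetD rcounts (k - 1) 0)
  (rcounts, displs)

def auxiliary_arrays (M : Int) (num : Int) : List Int × List Int :=
  let ave := PySem.Int.floordiv M num
  let res := PySem.Int.mod M num
  let rcounts : List Int := List.replicate num.toNat 0   -- [0] * num
  let displs : List Int := List.replicate num.toNat 0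
  (PySem.List.pyRange 0 num 1).foldl (pvAStep ave res) (rcounts, displs)

-- ===== PORT B =====
def auxiliary_arrays_alt (M : Int) (num : Int) : List Int × List Int :=
  let ave := PySem.Int.floordiv M num
  let res := PySem.Int.mod M num
  ((PySem.List.pyRange 0 num 1).map (fun k => if k < res then ave + 1 else ave),
   (PySem.List.pyRange 0 num 1).map (fun k => ave * k + min k res))

-- ===== PRECONDITION & SPEC =====
-- num = 0 is excluded: divmod(M, 0) raises ZeroDivisionError in A (and in B).
def Pre_auxiliary_arrays (M : Int) (num : Int) : Prop := num ≠ 0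
instance (M : Int) (num : Int) : Decidable (Pre_auxiliary_arrays M num) := by
  unfold Pre_auxiliary_arrays; infer_instance

def pvWitness_auxiliary_arrays : Int × Int := (10, 3)

def Spec_auxiliary_arrays (M : Int) (num : Int) (out : List Int × List Int) : Prop :=
  out = auxiliary_arrays_alt M num
instance (M : Int) (num : Int) (out : List Int × List Int) :
    Decidable (Spec_auxiliary_arrays M num out) := by unfold Spec_auxiliary_arrays; infer_instance

-- ===== CLAIM (what is proved, stated in full; the proofs are below) =====
def Claim_equal_auxiliary_arrays : Prop := ∀ (M : Int) (num : Int),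
  Dom_auxiliary_arrays M num → Pre_auxiliary_arrays M num →
  Spec_auxiliary_arrays M num (auxiliary_arrays M num)

-- ===== LEMMAS AND PROOFS =====

-- A's step preserves the lengths of both lists.
theorem pvAStep_length (ave res : Int) (st : List Int × List Int) (k : Int) :
    (pvAStep ave res st k).1.length = st.1.length ∧
    (pvAStep ave res st k).2.length = st.2.length := by
  unfold pvAStep
  constructor <;> simp [PySem.List.length_pySetD] <;> split <;>
    simp [PySem.List.length_pySetD]

theorem pvAFold_length (ave res : Int) (l : List Int) (st : List Int × List Int) :
    (l.foldl (pvAStep ave res) st).1.length = st.1.length ∧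
    (l.foldl (pvAStep ave res) st).2.length = st.2.length := by
  induction l generalizing st with
  | nil => exact ⟨rfl, rfl⟩
  | cons k t ih =>
    simp only [List.foldl_cons]
    rcases ih (pvAStep ave res st k) with ⟨h1, h2⟩
    rcases pvAStep_length ave res st k with ⟨g1, g2⟩
    exact ⟨h1.trans g1, h2.trans g2⟩

-- Folding over range m only touches indices < m: appended tails pass through.
theorem pvAFold_append (ave res : Int) (m : Nat) (xs ys a b : List Int)
    (hx : m ≤ xs.length) (hy : m ≤ ys.length) :
    ((List.range m).map (Nat.cast : Nat → Int)).foldl (pvAStep ave res) (xs ++ a, ys ++ b)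
      = ((((List.range m).map (Nat.cast : Nat → Int)).foldl (pvAStep ave res) (xs, ys)).1 ++ a,
         (((List.range m).map (Nat.cast : Nat → Int)).foldl (pvAStep ave res) (xs, ys)).2 ++ b) := by
  induction m generalizing xs ys with
  | zero => simp
  | succ n ih =>
    have hx' : n ≤ xs.length := by omega
    have hy' : n ≤ ys.length := by omega
    rcases pvAFold_length ave res ((List.range n).map (Nat.cast : Nat → Int)) (xs, ys) with ⟨l1, l2⟩
    set p := ((List.range n).map (Nat.cast : Nat → Int)).foldl (pvAStep ave res) (xs, ys) with hp
    simp only [List.range_succ, List.map_append, List.map_cons, List.map_nil,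
      List.foldl_append, List.foldl_cons, List.foldl_nil, ih xs ys hx' hy']
    simp only [← hp]
    simp only at l1 l2
    have hn1 : n < p.1.length := by omega
    have hn2 : n < p.2.length := by omega
    simp only [pvAStep, PySem.List.pySetD_natCast]
    by_cases h0 : (n : Int) = 0
    · simp only [h0, if_true]
      rw [List.set_append_left _ _ hn1, List.set_append_left _ _ hn2]
    · have hn : 1 ≤ n := by omega
      have hcast : (n : Int) - 1 = ((n - 1 : Nat) : Int) := by omega
      simp only [h0, if_false, hcast, PySem.List.pyGetD_natCast]
      have hlt1 : n - 1 < p.1.length := by omega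
      have hlt1' : n - 1 < (p.1.set n (if (n : Int) < res then ave + 1 else ave)).length := by
        simpa using hlt1
      have hlt2 : n - 1 < p.2.length := by omega
      rw [List.set_append_left _ _ hn1, List.getD_append _ _ _ _ hlt2,
          List.getD_append _ _ _ _ hlt1', List.set_append_left _ _ hn2]

-- The main loop invariant: folding A's step over range n starting from zero arrays
-- yields exactly B's two comprehensions (for 0 ≤ res).
theorem pvAFold_eq (ave res : Int) (hres : 0 ≤ res) (n : Nat) :
    ((List.range n).map (Nat.cast : Nat → Int)).foldl (pvAStep ave res)
        (List.replicate n 0, List.replicate n 0)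
      = (((List.range n).map (Nat.cast : Nat → Int)).map (fun k => if k < res then ave + 1 else ave),
         ((List.range n).map (Nat.cast : Nat → Int)).map (fun k => ave * k + min k res)) := by
  induction n with
  | zero => simp
  | succ n ih =>
    have hrep : (List.replicate (n + 1) (0 : Int)) = List.replicate n 0 ++ [0] := by
      simp [List.replicate_succ']
    rw [hrep]
    rw [List.range_succ]
    simp only [List.map_append, List.map_cons, List.map_nil, List.foldl_append,
      List.foldl_cons, List.foldl_nil]
    rw [pvAFold_append ave res n _ _ _ _ (by simp) (by simp), ih]
    simp only [pvAStep, PySem.List.pySetD_natCast]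
    have hlenF : (((List.range n).map (Nat.cast : Nat → Int)).map
        (fun k => if k < res then ave + 1 else ave)).length = n := by simp
    have hlenG : (((List.range n).map (Nat.cast : Nat → Int)).map
        (fun k => ave * k + min k res)).length = n := by simp
    by_cases h0 : (n : Int) = 0
    · have hn0 : n = 0 := by exact_mod_cast h0
      subst hn0
      simp [min_eq_left hres]
    · have hn : 1 ≤ n := by omega
      simp only [h0, if_false]
      have hcast : (n : Int) - 1 = ((n - 1 : Nat) : Int) := by omega
      rw [hcast]
      simp only [PySem.List.pyGetD_natCast]
      have hset1 : ((((List.range n).map (Nat.cast : Nat → Int)).map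
            (fun k => if k < res then ave + 1 else ave)) ++ [(0:Int)]).set n
            (if (n:Int) < res then ave + 1 else ave)
          = (((List.range n).map (Nat.cast : Nat → Int)).map
            (fun k => if k < res then ave + 1 else ave)) ++ [if (n:Int) < res then ave + 1 else ave] := by
        rw [show n = (((List.range n).map (Nat.cast : Nat → Int)).map
              (fun k => if k < res then ave + 1 else ave)).length from hlenF.symm]
        simp
      rw [hset1]
      have hgetF : ((((List.range n).map (Nat.cast : Nat → Int)).map
            (fun k => if k < res then ave + 1 else ave))
            ++ [if (n:Int) < res then ave + 1 else ave]).getD (n-1) 0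
          = (if ((n-1 : Nat) : Int) < res then ave + 1 else ave) := by
        rw [List.getD_append _ _ _ _ (by simp only [List.length_map, List.length_range]; omega)]
        rw [List.getD_eq_getElem _ _ (by simp only [List.length_map, List.length_range]; omega)]
        simp
      have hgetG : ((((List.range n).map (Nat.cast : Nat → Int)).map
            (fun k => ave * k + min k res)) ++ [(0:Int)]).getD (n-1) 0
          = ave * ((n-1 : Nat) : Int) + min ((n-1 : Nat) : Int) res := by
        rw [List.getD_append _ _ _ _ (by simp only [List.length_map, List.length_range]; omega)]
        rw [List.getD_eq_getElem _ _ (by simp only [List.length_map, List.length_range]; omega)]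
        simp
      rw [hgetF, hgetG]
      have hval : ave * ((n-1 : Nat) : Int) + min ((n-1 : Nat) : Int) res
            + (if ((n-1 : Nat) : Int) < res then ave + 1 else ave)
          = ave * (n : Int) + min (n : Int) res := by
        have hc : ((n - 1 : Nat) : Int) = (n : Int) - 1 := by omega
        rw [hc]
        by_cases hlt : (n : Int) - 1 < res
        · rw [if_pos hlt, min_eq_left (by omega), min_eq_left (by omega)]; ring
        · rw [if_neg hlt, min_eq_right (by omega), min_eq_right (by omega)]; ring
      rw [hval]
      rw [show n = ((((List.range n).map (Nat.cast : Nat → Int)).map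
            (fun k => ave * k + min k res))).length from hlenG.symm]
      simp

-- ===== VERDICT (by name: the statement is the Claim_ definition above) =====
theorem auxiliary_arrays_spec : Claim_equal_auxiliary_arrays := by
  intro M num _ hnum
  unfold Spec_auxiliary_arrays auxiliary_arrays auxiliary_arrays_alt
  rcases lt_or_gt_of_ne hnum with hneg | hpos
  · -- num < 0: range is empty, [0]*num is empty on both sides
    have h1 : PySem.List.pyRange 0 num 1 = [] := by
      simp [PySem.List.pyRange]
      omega
    have h2 : num.toNat = 0 := Int.toNat_of_nonpos (le_of_lt hneg)
    simp [h1, h2]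
  · -- num > 0
    have hn : num = ((num.toNat : Nat) : Int) := (Int.toNat_of_nonneg (le_of_lt hpos)).symm
    have hres : 0 ≤ PySem.Int.mod M num := PySem.Int.mod_nonneg M hpos
    have hr : PySem.List.pyRange 0 num 1 = (List.range num.toNat).map (Nat.cast : Nat → Int) := by
      conv_lhs => rw [hn]
      exact PySem.List.pyRange_zero_natCast num.toNat
    simp only [hr]
    exact pvAFold_eq _ _ hres num.toNat
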